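-- pv_equiv track=rewrite | github.com/skytthe/advent-of-code | 2024/py/day07/day07.py | calc
-- ===== SOURCE A (Python) =====
-- def calc(goal, input):
--     if len(input) == 1:
--         return (goal == input[0])
--     else:
--         i = input[0]
--         tmpAdd = input[1:]
--         tmpAdd[0] = tmpAdd[0] + i
--         tmpMul = input[1:]
--         tmpMul[0] = tmpMul[0] * i
--         return calc(goal, tmpAdd) or calc(goal, tmpMul)
-- ===== SOURCE B (Python) =====
-- def calc(goal, input):
--     values = {input[0]}
--     for n in input[1:]:
--         values = {v + n for v in values} | {v * n for v in values}
--     return goal in values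
-- ===== Notes on version B (the rewrite author's own statement) =====
-- stated objective: alternative
-- what changed: Replaces the binary recursion over the two operators with a single left-to-right pass that maintains the set of all reachable partial results and checks membership of the goal at the end; it trades the recursion stack for an explicit frontier set that merges duplicate partial results.
import Mathlib
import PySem

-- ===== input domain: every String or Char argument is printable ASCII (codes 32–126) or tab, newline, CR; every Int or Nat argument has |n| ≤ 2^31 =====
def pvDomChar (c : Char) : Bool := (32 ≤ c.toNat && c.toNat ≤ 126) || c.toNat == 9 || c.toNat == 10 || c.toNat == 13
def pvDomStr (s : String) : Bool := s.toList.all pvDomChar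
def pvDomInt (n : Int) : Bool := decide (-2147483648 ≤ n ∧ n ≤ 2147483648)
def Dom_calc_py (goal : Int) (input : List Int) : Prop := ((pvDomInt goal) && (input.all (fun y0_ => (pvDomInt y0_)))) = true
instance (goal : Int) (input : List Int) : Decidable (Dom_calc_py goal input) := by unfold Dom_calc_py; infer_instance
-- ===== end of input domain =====

-- B replaces A's binary recursion over +/* with one left-to-right pass maintaining the
-- set of reachable partial results; membership of the goal is checked at the end (alternative decomposition).


-- ===== PORT A =====
-- literal transliteration of A: if len==1 compare, else build tmpAdd/tmpMul copies
-- with the head folded into the second element and recurse on both.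
def calc_py (goal : Int) (input : List Int) : Bool :=
  match input with
  | [] => false            -- Python raises IndexError here (excluded by Pre_calc_py)
  | [x] => goal == x
  | i :: y :: rest =>
      let tmpAdd := (y + i) :: rest
      let tmpMul := (y * i) :: rest
      calc_py goal tmpAdd || calc_py goal tmpMul
termination_by input.length
decreasing_by all_goals simp

-- ===== PORT B =====
-- one step of Source B's loop body: {v + n for v in values} | {v * n for v in values}
def pvFrontierStep (vs : List Int) (n : Int) : PySem.Set Int :=
  PySem.Set.union (PySem.Set.ofList (vs.map (· + n))) (vs.map (· * n))

def calc_py_alt (goal : Int) (input : List Int) : Bool :=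
  match input with
  | [] => false            -- Python raises IndexError here (excluded by Pre_calc_py)
  | x :: xs =>
      let values := xs.foldl pvFrontierStep (PySem.Set.ofList [x])
      decide (goal ∈ values)

-- ===== PRECONDITION & SPEC =====
-- Pre_ excludes only the empty list, on which both A and B raise IndexError (input[0]).
def Pre_calc_py (goal : Int) (input : List Int) : Prop := input ≠ []
instance (goal : Int) (input : List Int) : Decidable (Pre_calc_py goal input) := by unfold Pre_calc_py; infer_instance
def pvWitness_calc_py : Int × List Int := (9, [2, 3, 4])

def Spec_calc_py (goal : Int) (input : List Int) (out : Bool) : Prop := out = calc_py_alt goal input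
instance (goal : Int) (input : List Int) (out : Bool) : Decidable (Spec_calc_py goal input out) := by unfold Spec_calc_py; infer_instance

-- ===== CLAIM (what is proved, stated in full; the proofs are below) =====
def Claim_equal_calc_py : Prop := ∀ (goal : Int) (input : List Int), Dom_calc_py goal input → Pre_calc_py goal input → Spec_calc_py goal input (calc_py goal input)

-- ===== LEMMAS AND PROOFS =====

-- membership in one frontier step
lemma mem_pvFrontierStep (w : Int) (vs : List Int) (n : Int) :
    w ∈ pvFrontierStep vs n ↔ ∃ v ∈ vs, w = v + n ∨ w = v * n := by
  simp only [pvFrontierStep, PySem.Set.mem_union, PySem.Set.mem_ofList, List.mem_map]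
  constructor
  · rintro (⟨v, hv, rfl⟩ | ⟨v, hv, rfl⟩) <;> exact ⟨v, hv, by simp⟩
  · rintro ⟨v, hv, rfl | rfl⟩
    · exact Or.inl ⟨v, hv, rfl⟩
    · exact Or.inr ⟨v, hv, rfl⟩

-- the frontier after consuming xs contains goal iff A succeeds from some seed in the frontier
lemma frontier_correct (goal : Int) (xs : List Int) (s : List Int) :
    goal ∈ xs.foldl pvFrontierStep s ↔ ∃ v ∈ s, calc_py goal (v :: xs) = true := by
  induction xs generalizing s with
  | nil =>
      simp [calc_py]
  | cons n rest ih =>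
      rw [List.foldl_cons, ih]
      constructor
      · rintro ⟨w, hw, hcalc⟩
        rcases (mem_pvFrontierStep w s n).1 hw with ⟨v, hv, rfl | rfl⟩
        · refine ⟨v, hv, ?_⟩
          rw [calc_py]
          exact Bool.or_eq_true_iff.2 (Or.inl (by rwa [Int.add_comm n v]))
        · refine ⟨v, hv, ?_⟩
          rw [calc_py]
          exact Bool.or_eq_true_iff.2 (Or.inr (by rwa [Int.mul_comm n v]))
      · rintro ⟨v, hv, hcalc⟩
        rw [calc_py] at hcalc
        rcases Bool.or_eq_true_iff.1 hcalc with h | h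
        · exact ⟨n + v, (mem_pvFrontierStep _ s n).2 ⟨v, hv, Or.inl (Int.add_comm n v)⟩, h⟩
        · exact ⟨n * v, (mem_pvFrontierStep _ s n).2 ⟨v, hv, Or.inr (Int.mul_comm n v)⟩, h⟩

-- ===== VERDICT (by name: the statement is the Claim_ definition above) =====
theorem calc_py_spec : Claim_equal_calc_py := by
  intro goal input _ hpre
  unfold Spec_calc_py
  match input with
  | [] => exact absurd rfl hpre
  | x :: xs =>
      show calc_py goal (x :: xs) = calc_py_alt goal (x :: xs)
      simp only [calc_py_alt]
      have h := frontier_correct goal xs (PySem.Set.ofList [x])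
      simp only [PySem.Set.mem_ofList, List.mem_singleton] at h
      by_cases hm : goal ∈ xs.foldl pvFrontierStep (PySem.Set.ofList [x])
      · obtain ⟨v, rfl, hc⟩ := h.1 hm
        simp [hc, hm]
      · simp only [hm, decide_false]
        by_contra hne
        have : calc_py goal (x :: xs) = true := by
          cases hcx : calc_py goal (x :: xs) with
          | false => simp [hcx] at hne
          | true => rfl
        exact hm (h.2 ⟨x, rfl, this⟩)
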